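-- pv_equiv track=rewrite | github.com/really-that-lazy/cs116 | assignments/3/a03q3.py | passwordHasUppercase
-- ===== SOURCE A (Python) =====
-- def passwordHasUppercase(psswdInput):
-- 	upperos = "ABCDEFGHIJKLMNOPQRSTUVWXYZ"
--
-- 	if(psswdInput == ""):
-- 		return False
-- 	elif(psswdInput[0] in upperos):
-- 		return True
-- 	else:
-- 		return passwordHasUppercase(psswdInput[1:])
-- ===== SOURCE B (Python) =====
-- def passwordHasUppercase(psswdInput):
-- 	upperos = "ABCDEFGHIJKLMNOPQRSTUVWXYZ"
-- 	for c in psswdInput: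
-- 		if c in upperos:
-- 			return True
-- 	return False
-- ===== Notes on version B (the rewrite author's own statement) =====
-- stated objective: faster
-- what changed: Replaces the linear recursion that rebuilds psswdInput[1:] at each step by a single iterative for-loop over the characters with early return, keeping the explicit A-Z membership test.
import Mathlib
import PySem

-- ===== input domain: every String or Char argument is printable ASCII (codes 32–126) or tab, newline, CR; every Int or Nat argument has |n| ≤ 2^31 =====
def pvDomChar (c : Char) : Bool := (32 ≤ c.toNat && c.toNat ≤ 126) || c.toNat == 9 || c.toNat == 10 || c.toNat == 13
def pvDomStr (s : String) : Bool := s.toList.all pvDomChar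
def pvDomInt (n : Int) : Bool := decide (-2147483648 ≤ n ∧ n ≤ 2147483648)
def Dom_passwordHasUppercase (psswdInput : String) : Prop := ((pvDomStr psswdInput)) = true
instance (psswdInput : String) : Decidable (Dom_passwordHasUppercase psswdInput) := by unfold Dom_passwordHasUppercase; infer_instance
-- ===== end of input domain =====

-- B replaces A's linear recursion over psswdInput[1:] slices by a single iterative
-- scan with early exit (ported as List.any), keeping the explicit A-Z membership test.

-- ===== PORT A =====
def pvUpperos : List Char := "ABCDEFGHIJKLMNOPQRSTUVWXYZ".toList

-- A's recursion: empty check, head membership in upperos, recurse on the tail.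
def pvRecA : List Char → Bool
  | [] => false
  | c :: rest => if pvUpperos.contains c then true else pvRecA rest

def passwordHasUppercase (psswdInput : String) : Bool := pvRecA psswdInput.toList

-- ===== PORT B =====
-- B's for-loop with early return over the characters.
def passwordHasUppercase_alt (psswdInput : String) : Bool :=
  psswdInput.toList.any (fun c => pvUpperos.contains c)

-- ===== PRECONDITION & SPEC =====
def Spec_passwordHasUppercase (psswdInput : String) (out : Bool) : Prop := out = passwordHasUppercase_alt psswdInput
instance (psswdInput : String) (out : Bool) : Decidable (Spec_passwordHasUppercase psswdInput out) := by unfold Spec_passwordHasUppercase; infer_instance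

-- ===== CLAIM (what is proved, stated in full; the proofs are below) =====
def Claim_equal_passwordHasUppercase : Prop := ∀ (psswdInput : String), Dom_passwordHasUppercase psswdInput → Spec_passwordHasUppercase psswdInput (passwordHasUppercase psswdInput)

-- ===== LEMMAS AND PROOFS =====

-- ===== VERDICT (by name: the statement is the Claim_ definition above) =====
lemma pvRecA_eq_any (l : List Char) : pvRecA l = l.any (fun c => pvUpperos.contains c) := by
  induction l with
  | nil => rfl
  | cons c rest ih => simp [pvRecA, List.any, ih]

-- ===== VERDICT =====
theorem passwordHasUppercase_spec : Claim_equal_passwordHasUppercase := by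
  intro s _
  unfold Spec_passwordHasUppercase passwordHasUppercase passwordHasUppercase_alt
  exact pvRecA_eq_any s.toList
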